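-- pv_equiv track=rewrite | github.com/danagle/advent-of-code | 2023/15/solution.py | part_two
-- ===== SOURCE A (Python) =====
-- def get_hash_value(step):
--     value = 0
--     for ch in step:
--         value = ((value + ord(ch)) * 17) % 256
--     return value
--
-- def box_lenses(equations_list):
--     lens_boxes = [dict() for _ in range(256)]
--     for equation in equations_list:
--         if "-" == equation[-1]:
--             label = equation[:-1]
--             lens_boxes[get_hash_value(label)].pop(label, None)
--         else:
--             label, focal_length = equation.split("=")
--             lens_boxes[get_hash_value(label)][label] = int(focal_length)
--     return lens_boxes
--
-- def part_two(sequence):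
--     boxes = box_lenses(sequence)
--     total = 0
--     for box_number, box in enumerate(boxes, start=1):
--         slot_number = 1
--         for _, focal_length in box.items():
--             total += box_number * slot_number * focal_length
--             slot_number += 1
--     return total
-- ===== SOURCE B (Python) =====
-- def get_hash_value(step):
--     value = 0
--     for ch in step:
--         value = ((value + ord(ch)) * 17) % 256
--     return value
--
-- def part_two(sequence):
--     # One flat insertion-ordered dict instead of 256 per-box dicts: Python dicts
--     # keep insertion order, reassignment keeps position and pop deletes, so the
--     # relative order of the labels of each box is preserved; each box is
--     # recovered at summing time by grouping labels by their hash value.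
--     lenses = {}
--     for equation in sequence:
--         if equation.endswith("-"):
--             lenses.pop(equation[:-1], None)
--         else:
--             label, focal = equation.split("=")
--             lenses[label] = int(focal)
--     total = 0
--     for box_number in range(256):
--         slot = 0
--         for label, focal_length in lenses.items():
--             if get_hash_value(label) == box_number:
--                 slot += 1
--                 total += (box_number + 1) * slot * focal_length
--     return total
-- ===== Notes on version B (the rewrite author's own statement) =====
-- stated objective: alternative
-- what changed: B keeps a single flat insertion-ordered dict of all lenses instead of A's 256 per-box dicts, exploiting that dict order restricted to each hash bucket equals the per-box order, and recovers each box at summing time by grouping labels by their hash value with a per-box slot counter.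
import Mathlib
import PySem

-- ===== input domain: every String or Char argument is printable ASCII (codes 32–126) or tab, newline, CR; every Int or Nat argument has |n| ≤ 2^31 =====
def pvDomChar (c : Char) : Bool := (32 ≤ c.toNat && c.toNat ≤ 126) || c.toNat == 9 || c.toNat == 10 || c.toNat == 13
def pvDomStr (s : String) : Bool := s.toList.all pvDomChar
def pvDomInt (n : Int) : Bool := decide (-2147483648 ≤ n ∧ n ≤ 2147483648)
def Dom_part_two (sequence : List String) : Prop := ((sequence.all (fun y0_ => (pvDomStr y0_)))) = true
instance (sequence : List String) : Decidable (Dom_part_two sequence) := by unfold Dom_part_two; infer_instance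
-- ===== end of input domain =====

-- B replaces A's 256 per-box dicts with ONE flat insertion-ordered dict and recovers each
-- box at summing time by grouping labels by their hash value (objective: alternative).

-- shared module helper get_hash_value (identical in both Python sources)
def pvHash (cs : List Char) : Int :=
  cs.foldl (fun v ch => PySem.Int.mod ((v + (ch.toNat : Int)) * 17) 256) 0

-- ===== PORT A =====
-- one iteration of box_lenses' loop; none = the Python raises (IndexError / ValueError)
def part_two_stepA (boxes : List (PySem.Dict (List Char) Int)) (equation : String) :
    Option (List (PySem.Dict (List Char) Int)) :=
  match PySem.List.pyGet? equation.toList (-1) with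
  | none => none
  | some c =>
    if c = '-' then
      let label := PySem.List.slice equation.toList none (some (-1))
      some (boxes.modify (pvHash label).toNat (fun d => d.erase label))
    else
      match PySem.Chars.splitOn equation.toList ['='] with
      | [label, focal] =>
        match PySem.Int.ofChars? focal with
        | none => none
        | some n => some (boxes.modify (pvHash label).toNat (fun d => d.insert label n))
      | _ => none

def part_two (sequence : List String) : Int :=
  match sequence.foldlM part_two_stepA (List.replicate 256 PySem.Dict.empty) with
  | none => 0
  | some boxes =>
    (PySem.List.enumerate boxes 1).foldl (fun total bb =>
      (PySem.List.enumerate bb.2.items 1).foldl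
        (fun t sp => t + bb.1 * sp.1 * sp.2.2) total) 0

-- ===== PORT B =====
def part_two_stepB (lenses : PySem.Dict (List Char) Int) (equation : String) :
    Option (PySem.Dict (List Char) Int) :=
  if PySem.Str.endswith equation "-" then
    some (lenses.erase (PySem.List.slice equation.toList none (some (-1))))
  else
    match PySem.Chars.splitOn equation.toList ['='] with
    | [label, focal] =>
      match PySem.Int.ofChars? focal with
      | none => none
      | some n => some (lenses.insert label n)
    | _ => none

def part_two_alt (sequence : List String) : Int :=
  match sequence.foldlM part_two_stepB PySem.Dict.empty with
  | none => 0
  | some lenses =>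
    (PySem.List.pyRange 0 256 1).foldl (fun total b =>
      (lenses.items.foldl
        (fun st p => if pvHash p.1 = b then (st.1 + 1, st.2 + (b + 1) * (st.1 + 1) * p.2) else st)
        ((0 : Int), total)).2) 0


-- ===== PRECONDITION & SPEC =====
-- Pre_ excludes exactly the inputs on which the Python A raises: an empty equation
-- (IndexError on equation[-1]) and an equation not ending in '-' that does not split on '='
-- into exactly two parts with an int()-parsable second part (ValueError).
def Pre_part_two (sequence : List String) : Prop :=
  ∀ e ∈ sequence, e.toList ≠ [] ∧
    (e.toList.getLast? = some '-' ∨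
      ((PySem.Chars.splitOn e.toList ['=']).length = 2 ∧
       (PySem.Int.ofChars? ((PySem.Chars.splitOn e.toList ['=']).getD 1 [])).isSome))
instance (sequence : List String) : Decidable (Pre_part_two sequence) := by
  unfold Pre_part_two; infer_instance

def pvWitness_part_two : List String := ["rn=1", "cm-", "qp=3", "cm=2", "qp-", "pc=4"]

def Spec_part_two (sequence : List String) (out : Int) : Prop := out = part_two_alt sequence
instance (sequence : List String) (out : Int) : Decidable (Spec_part_two sequence out) := by
  unfold Spec_part_two; infer_instance

-- ===== CLAIM (what is proved, stated in full; the proofs are below) =====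
def Claim_equal_part_two : Prop := ∀ (sequence : List String), Dom_part_two sequence →
  Pre_part_two sequence → Spec_part_two sequence (part_two sequence)

-- ===== LEMMAS =====
theorem pvHash_aux (cs : List Char) (v : Int) (h0 : 0 ≤ v) (h1 : v < 256) :
    0 ≤ cs.foldl (fun v ch => PySem.Int.mod ((v + (ch.toNat : Int)) * 17) 256) v ∧
    cs.foldl (fun v ch => PySem.Int.mod ((v + (ch.toNat : Int)) * 17) 256) v < 256 := by
  induction cs generalizing v with
  | nil => exact ⟨h0, h1⟩
  | cons c cs ih =>
    simp only [List.foldl]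
    exact ih _ (PySem.Int.mod_nonneg _ (by norm_num)) (PySem.Int.mod_lt _ (by norm_num))

theorem pvHash_bounds (cs : List Char) : 0 ≤ pvHash cs ∧ pvHash cs < 256 :=
  pvHash_aux cs 0 le_rfl (by norm_num)

theorem pvHash_toNat_cast (cs : List Char) : (((pvHash cs).toNat : Int)) = pvHash cs :=
  Int.toNat_of_nonneg (pvHash_bounds cs).1

def mkBoxes (d : PySem.Dict (List Char) Int) : List (PySem.Dict (List Char) Int) :=
  (PySem.List.pyRange 0 256 1).map
    (fun h => PySem.Dict.mk (d.items.filter (fun p => pvHash p.1 == h)))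

theorem length_mkBoxes (d : PySem.Dict (List Char) Int) : (mkBoxes d).length = 256 := by
  simp [mkBoxes, PySem.List.length_pyRange_one]

theorem getElem_mkBoxes (d : PySem.Dict (List Char) Int) (j : Nat) (hj : j < 256) :
    (mkBoxes d)[j]'(by rw [length_mkBoxes]; exact hj) =
      PySem.Dict.mk (d.items.filter (fun p => pvHash p.1 == (j : Int))) := by
  simp [mkBoxes, PySem.List.getElem_pyRange_one]

theorem erase_mkBoxes (d : PySem.Dict (List Char) Int) (lab : List Char) :
    (mkBoxes d).modify (pvHash lab).toNat (fun b => b.erase lab) = mkBoxes (d.erase lab) := by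
  apply List.ext_getElem
  · simp [List.length_modify, length_mkBoxes]
  · intro j h1 h2
    have hj : j < 256 := by rw [List.length_modify, length_mkBoxes] at h1; exact h1
    rw [List.getElem_modify, getElem_mkBoxes _ _ hj, getElem_mkBoxes _ _ hj]
    show _ = PySem.Dict.mk ((d.items.filter (fun p => !(p.1 == lab))).filter (fun p => pvHash p.1 == (j : Int)))
    by_cases hk : (pvHash lab).toNat = j
    · simp only [if_pos hk]
      show PySem.Dict.mk ((d.items.filter (fun p => pvHash p.1 == (j:Int))).filter (fun p => !(p.1 == lab))) = _
      rw [List.filter_filter, List.filter_filter]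
      congr 2
      funext p
      exact Bool.and_comm _ _
    · simp only [if_neg hk]
      congr 1
      rw [List.filter_filter]
      apply List.filter_congr
      intro p _
      by_cases hpl : p.1 = lab
      · have hne : pvHash p.1 ≠ (j : Int) := by
          rw [hpl]; intro hcon
          exact hk (by rw [← pvHash_toNat_cast lab] at hcon; exact_mod_cast hcon)
        simp [hne]
      · simp [hpl]

theorem contains_filter_hash (d : PySem.Dict (List Char) Int) (lab : List Char) :
    (PySem.Dict.mk (d.items.filter (fun p => pvHash p.1 == pvHash lab))).contains lab
      = d.contains lab := by
  simp only [PySem.Dict.contains, List.any_filter]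
  congr 1
  funext p
  by_cases hpl : p.1 = lab
  · simp [hpl]
  · simp [hpl]

theorem insert_mkBoxes (d : PySem.Dict (List Char) Int) (lab : List Char) (n : Int) :
    (mkBoxes d).modify (pvHash lab).toNat (fun b => b.insert lab n) = mkBoxes (d.insert lab n) := by
  apply List.ext_getElem
  · simp [List.length_modify, length_mkBoxes]
  · intro j h1 h2
    have hj : j < 256 := by rw [List.length_modify, length_mkBoxes] at h1; exact h1
    rw [List.getElem_modify, getElem_mkBoxes _ _ hj, getElem_mkBoxes _ _ hj]
    by_cases hk : (pvHash lab).toNat = j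
    · have hcast : (j : Int) = pvHash lab := by rw [← hk, pvHash_toNat_cast]
      simp only [if_pos hk]
      apply PySem.Dict.ext
      by_cases hc : d.contains lab = true
      · have hc' : (PySem.Dict.mk (d.items.filter (fun p => pvHash p.1 == (j:Int)))).contains lab = true := by
          rw [hcast]; exact (contains_filter_hash d lab).trans hc
        rw [PySem.Dict.items_insert_of_contains _ n hc']
        show _ = (PySem.Dict.mk (((d.insert lab n).items).filter (fun p => pvHash p.1 == (j:Int)))).items
        rw [PySem.Dict.items_insert_of_contains d n hc]
        show List.map _ (PySem.Dict.items (PySem.Dict.mk _)) = List.filter _ (List.map _ _)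
        rw [List.filter_map]
        congr 1
        show List.filter _ d.items = List.filter _ d.items
        apply List.filter_congr
        intro p _
        by_cases hpl : p.1 = lab
        · simp [Function.comp, hpl, hcast]
        · simp [Function.comp, hpl]
      · have hcb : d.contains lab = false := by simpa using hc
        have hc' : (PySem.Dict.mk (d.items.filter (fun p => pvHash p.1 == (j:Int)))).contains lab = false := by
          rw [hcast]; exact (contains_filter_hash d lab).trans hcb
        rw [PySem.Dict.items_insert_of_not_contains _ n hc']
        show _ = (PySem.Dict.mk (((d.insert lab n).items).filter (fun p => pvHash p.1 == (j:Int)))).items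
        rw [PySem.Dict.items_insert_of_not_contains d n hcb]
        show PySem.Dict.items (PySem.Dict.mk _) ++ _ = List.filter _ (_ ++ _)
        rw [List.filter_append]
        congr 1
        simp [hcast]
    · simp only [if_neg hk]
      congr 1
      have hne : pvHash lab ≠ (j : Int) := by
        intro hcon
        exact hk (by rw [← pvHash_toNat_cast lab] at hcon; exact_mod_cast hcon)
      by_cases hc : d.contains lab = true
      · rw [PySem.Dict.items_insert_of_contains d n hc, List.filter_map]
        have hcmp : ((fun (p : List Char × Int) => pvHash p.1 == (j:Int)) ∘
            (fun p => if p.1 == lab then (lab, n) else p))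
            = (fun (p : List Char × Int) => pvHash p.1 == (j:Int)) := by
          funext p
          by_cases hpl : p.1 = lab
          · simp [Function.comp, hpl]
          · simp [Function.comp, hpl]
        rw [hcmp]
        have hid : ∀ p ∈ d.items.filter (fun p => pvHash p.1 == (j:Int)),
            (fun (p : List Char × Int) => if p.1 == lab then (lab, n) else p) p = id p := by
          intro p hp
          have hmem := List.of_mem_filter hp
          have hpl : ¬ (p.1 = lab) := by
            intro hpl
            rw [hpl] at hmem
            simp [hne] at hmem
          simp [hpl]
        rw [List.map_congr_left hid, List.map_id]
      · have hcb : d.contains lab = false := by simpa using hc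
        rw [PySem.Dict.items_insert_of_not_contains d n hcb, List.filter_append]
        simp [hne]

theorem endswith_concat (l : List Char) (c : Char) :
    PySem.Chars.endswith (l ++ [c]) ['-'] = decide (c = '-') := by
  rcases h : PySem.Chars.endswith (l ++ [c]) ['-'] with _ | _
  · by_cases hc : c = '-'
    · exfalso
      have : PySem.Chars.endswith (l ++ [c]) ['-'] = true :=
        (PySem.Chars.endswith_iff _ _).mpr ⟨l, by rw [hc]⟩
      rw [h] at this
      exact Bool.false_ne_true this
    · simp [hc]
  · have hs := (PySem.Chars.endswith_iff _ _).mp h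
    obtain ⟨t, ht⟩ := hs
    have hlast := congrArg List.getLast? ht
    simp at hlast
    subst hlast
    simp

theorem stepAB_aux (d : PySem.Dict (List Char) Int) (cs : List Char) :
    (match PySem.List.pyGet? cs (-1) with
     | none => none
     | some c =>
       if c = '-' then
         some ((mkBoxes d).modify (pvHash (PySem.List.slice cs none (some (-1)))).toNat
           (fun b => b.erase (PySem.List.slice cs none (some (-1)))))
       else
         match PySem.Chars.splitOn cs ['='] with
         | [label, focal] =>
           match PySem.Int.ofChars? focal with
           | none => none
           | some n => some ((mkBoxes d).modify (pvHash label).toNat (fun b => b.insert label n))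
         | _ => none)
    = Option.map mkBoxes
      (if PySem.Chars.endswith cs ['-'] then
         some (d.erase (PySem.List.slice cs none (some (-1))))
       else
         match PySem.Chars.splitOn cs ['='] with
         | [label, focal] =>
           match PySem.Int.ofChars? focal with
           | none => none
           | some n => some (d.insert label n)
         | _ => none) := by
  rcases List.eq_nil_or_concat cs with rfl | ⟨l, c, rfl⟩
  · rfl
  · simp only [List.concat_eq_append, PySem.List.pyGet?_neg_one_append_singleton, endswith_concat]
    by_cases hc : c = '-'
    · rw [if_pos hc, if_pos (by simp [hc] : decide (c = '-') = true)]
      rw [erase_mkBoxes]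
      rfl
    · rw [if_neg hc, if_neg (by simp [hc] : ¬ (decide (c = '-') = true))]
      generalize PySem.Chars.splitOn (l ++ [c]) ['='] = ps
      rcases ps with _ | ⟨a, _ | ⟨b, _ | _⟩⟩
      · rfl
      · rfl
      · show (match PySem.Int.ofChars? b with
              | none => (none : Option (List (PySem.Dict (List Char) Int)))
              | some n => some ((mkBoxes d).modify (pvHash a).toNat (fun bx => bx.insert a n)))
            = Option.map mkBoxes (match PySem.Int.ofChars? b with
              | none => none
              | some n => some (d.insert a n))
        generalize PySem.Int.ofChars? b = r
        rcases r with _ | n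
        · rfl
        · show some _ = Option.map mkBoxes (some _)
          rw [Option.map_some, insert_mkBoxes]
      · rfl

theorem stepAB (d : PySem.Dict (List Char) Int) (equation : String) :
    part_two_stepA (mkBoxes d) equation = (part_two_stepB d equation).map mkBoxes := by
  simp only [part_two_stepA, part_two_stepB, PySem.Str.endswith_eq,
    show ("-" : String).toList = ['-'] from rfl]
  exact stepAB_aux d equation.toList

theorem foldAB (seq : List String) (d : PySem.Dict (List Char) Int) :
    seq.foldlM part_two_stepA (mkBoxes d) = (seq.foldlM part_two_stepB d).map mkBoxes := by
  induction seq generalizing d with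
  | nil => rfl
  | cons e seq ih =>
    simp only [List.foldlM_cons, stepAB]
    cases part_two_stepB d e with
    | none => rfl
    | some d' => simpa using ih d'

theorem innerEq (l : List (List Char × Int)) (b : Int) : ∀ (s t : Int),
    (PySem.List.enumerate (l.filter (fun p => pvHash p.1 == b)) (s + 1)).foldl
      (fun t sp => t + (b + 1) * sp.1 * sp.2.2) t
    = (l.foldl (fun st p => if pvHash p.1 = b then (st.1 + 1, st.2 + (b + 1) * (st.1 + 1) * p.2) else st)
        ((s : Int), t)).2 := by
  induction l with
  | nil => intro s t; rfl
  | cons p l ih =>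
    intro s t
    by_cases hp : pvHash p.1 = b
    · rw [List.filter_cons, if_pos (by simp [hp]), List.foldl_cons, if_pos hp,
        PySem.List.enumerate_cons, List.foldl_cons]
      exact ih (s + 1) _
    · rw [List.filter_cons, if_neg (by simp [hp]), List.foldl_cons, if_neg hp]
      exact ih s t

theorem outerEq (d : PySem.Dict (List Char) Int) : ∀ (N : Nat) (h0 t : Int),
    (PySem.List.enumerate ((PySem.List.pyRange h0 (h0 + (N : Int)) 1).map
        (fun h => PySem.Dict.mk (d.items.filter (fun p => pvHash p.1 == h)))) (h0 + 1)).foldl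
      (fun total bb => (PySem.List.enumerate bb.2.items 1).foldl
        (fun t sp => t + bb.1 * sp.1 * sp.2.2) total) t
    = (PySem.List.pyRange h0 (h0 + (N : Int)) 1).foldl
      (fun total b => (d.items.foldl
          (fun st p => if pvHash p.1 = b then (st.1 + 1, st.2 + (b + 1) * (st.1 + 1) * p.2) else st)
          ((0 : Int), total)).2) t := by
  intro N
  induction N with
  | zero =>
    intro h0 t
    rw [show h0 + ((0 : Nat) : Int) = h0 by push_cast; ring, PySem.List.pyRange_one_eq_nil le_rfl]
    rfl
  | succ N ih =>
    intro h0 t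
    have hlt : h0 < h0 + ((N + 1 : Nat) : Int) := by push_cast; omega
    have hsplit : h0 + ((N + 1 : Nat) : Int) = (h0 + 1) + (N : Int) := by push_cast; ring
    rw [PySem.List.pyRange_one_cons hlt, hsplit, List.map_cons, PySem.List.enumerate_cons,
      List.foldl_cons, List.foldl_cons]
    have hstep : (PySem.List.enumerate
          ((h0 + 1, PySem.Dict.mk (d.items.filter (fun p => pvHash p.1 == h0))).2.items) 1).foldl
          (fun t sp => t + (h0 + 1,
            PySem.Dict.mk (d.items.filter (fun p => pvHash p.1 == h0))).1 * sp.1 * sp.2.2) t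
        = (d.items.foldl
            (fun st p => if pvHash p.1 = h0 then (st.1 + 1, st.2 + (h0 + 1) * (st.1 + 1) * p.2) else st)
            ((0 : Int), t)).2 := by
      show (PySem.List.enumerate (d.items.filter (fun p => pvHash p.1 == h0)) 1).foldl
          (fun t sp => t + (h0 + 1) * sp.1 * sp.2.2) t = _
      have hinner := innerEq d.items h0 0 t
      rw [show (0 : Int) + 1 = 1 by ring] at hinner
      exact hinner
    rw [hstep]
    exact ih (h0 + 1) _

theorem init_boxes : List.replicate 256 (PySem.Dict.empty : PySem.Dict (List Char) Int)
    = mkBoxes PySem.Dict.empty := by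
  show _ = (PySem.List.pyRange 0 256 1).map _
  rw [show (fun h => PySem.Dict.mk (((PySem.Dict.empty : PySem.Dict (List Char) Int)).items.filter
      (fun p => pvHash p.1 == h))) = (fun _ : Int => (PySem.Dict.empty : PySem.Dict (List Char) Int)) from rfl]
  rw [List.map_const', PySem.List.length_pyRange_one]
  congr 1


-- ===== VERDICT (by name: the statement is the Claim_ definition above) =====
theorem part_two_spec : Claim_equal_part_two := by
  intro sequence _ _
  unfold Spec_part_two part_two part_two_alt
  rw [init_boxes, foldAB]
  cases h : sequence.foldlM part_two_stepB PySem.Dict.empty with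
  | none => rfl
  | some d =>
    simp only [Option.map_some]
    have hout := outerEq d 256 0 0
    rw [show (0 : Int) + ((256 : Nat) : Int) = 256 by norm_num,
        show (0 : Int) + 1 = 1 by ring] at hout
    exact hout
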